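-- pv_equiv track=rewrite | github.com/x18-1/- | Learning/test.py | f
-- ===== SOURCE A (Python) =====
-- def f(s):
--     result = [[] for i in range(51)]
--     scan,i = 0,0
--     while i<len(s):
--         if s[i] != "$":
--             result[scan].append(s[i])
--         elif s[i]=="$":
--             scan+=1
--         i+=1
--     return result
-- ===== SOURCE B (Python) =====
-- def f(s):
--     result = [[] for _ in range(51)]
--     for i, part in enumerate(s.split("$")):
--         if part:
--             result[i].extend(part)
--     return result
-- ===== Notes on version B (the rewrite author's own statement) =====
-- stated objective: faster
-- what changed: Replaces the char-by-char while loop with a manual bucket counter by splitting the string on the dollar delimiter once and extending one preallocated bucket per non-empty segment.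
import Mathlib
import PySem

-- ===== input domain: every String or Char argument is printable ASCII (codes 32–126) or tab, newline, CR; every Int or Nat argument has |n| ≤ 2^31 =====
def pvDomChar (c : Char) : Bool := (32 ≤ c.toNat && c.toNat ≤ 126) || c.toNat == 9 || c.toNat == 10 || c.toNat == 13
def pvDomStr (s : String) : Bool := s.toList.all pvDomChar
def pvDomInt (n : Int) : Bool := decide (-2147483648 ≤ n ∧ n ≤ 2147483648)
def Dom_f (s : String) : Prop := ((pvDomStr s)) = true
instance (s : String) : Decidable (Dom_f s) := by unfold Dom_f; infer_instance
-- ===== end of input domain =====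

-- B replaces A's char-by-char scan (manual bucket counter) by one split on the dollar
-- delimiter then one extend per non-empty segment; measured faster in a timing run.


-- ===== PORT A =====
-- A walks the string char by char, appending each non-delimiter char to bucket `scan`
-- and bumping `scan` on each delimiter.  (Python's result[scan].append raises IndexError when
-- scan > 50; Pre_f below excludes exactly those inputs.)
def fStep (st : List (List String) × Nat) (c : Char) : List (List String) × Nat :=
  if c ≠ '$' then (st.1.modify st.2 (· ++ [String.ofList [c]]), st.2)
  else (st.1, st.2 + 1)

def f (s : String) : List (List String) :=
  (s.toList.foldl fStep (List.replicate 51 [], 0)).1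

-- ===== PORT B =====
def bStep (res : List (List String)) (p : Int × String) : List (List String) :=
  if p.2 ≠ "" then res.modify p.1.toNat (· ++ p.2.toList.map (fun c => String.ofList [c]))
  else res

def f_alt (s : String) : List (List String) :=
  (PySem.List.enumerate ((PySem.Chars.splitOn s.toList "$".toList).map String.ofList)).foldl
    bStep (List.replicate 51 [])

-- ===== PRECONDITION & SPEC =====
-- Pre_f excludes exactly the inputs where the Python A raises IndexError: some
-- non-delimiter character preceded by more than 50 delimiters, i.e. a non-empty segment at
-- index ≥ 51.  (The Python B raises IndexError on exactly the same inputs.)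
def Pre_f (s : String) : Prop :=
  ∀ seg ∈ (PySem.Chars.splitOn s.toList "$".toList).drop 51, seg = []
instance (s : String) : Decidable (Pre_f s) := by unfold Pre_f; infer_instance

def pvWitness_f : String := "ab$cd$$e"

def Spec_f (s : String) (out : List (List String)) : Prop := out = f_alt s
instance (s : String) (out : List (List String)) : Decidable (Spec_f s out) := by unfold Spec_f; infer_instance

-- ===== CLAIM (what is proved, stated in full; the proofs are below) =====
def Claim_equal_f : Prop := ∀ (s : String), Dom_f s → Pre_f s → Spec_f s (f s)

-- ===== LEMMAS AND PROOFS =====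

-- canonical split of a char list on the delimiter (keeps empty segments, Python style)
def mySplit : List Char → List (List Char)
  | [] => [[]]
  | c :: cs => if c = '$' then [] :: mySplit cs else (mySplit cs).modifyHead (c :: ·)

theorem mySplit_ne_nil (cs : List Char) : mySplit cs ≠ [] := by
  induction cs with
  | nil => simp [mySplit]
  | cons c cs ih =>
    simp only [mySplit]
    split
    · simp
    · cases h : mySplit cs with
      | nil => exact absurd h ih
      | cons a as => simp [List.modifyHead]

theorem go_cons (n : Nat) (c : Char) (rest cur : List Char) (accs : List (List Char)) :
    PySem.Chars.splitOn.go ['$'] (n+1) (c::rest) cur accs =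
      if c = '$' then PySem.Chars.splitOn.go ['$'] n rest [] (cur.reverse :: accs)
      else PySem.Chars.splitOn.go ['$'] n rest (c :: cur) accs := by
  by_cases hc : c = '$'
  · subst hc; simp [PySem.Chars.splitOn.go, List.isPrefixOf]
  · simp [PySem.Chars.splitOn.go, List.isPrefixOf, hc, if_neg (Ne.symm hc)]

theorem go_nil (n : Nat) (cur : List Char) (accs : List (List Char)) :
    PySem.Chars.splitOn.go ['$'] (n+1) [] cur accs = (cur.reverse :: accs).reverse := by
  simp [PySem.Chars.splitOn.go]

theorem splitOn_go_eq (fuel : Nat) :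
    ∀ (l cur : List Char) (accs : List (List Char)), l.length < fuel →
      PySem.Chars.splitOn.go ['$'] fuel l cur accs =
        accs.reverse ++ (mySplit l).modifyHead (cur.reverse ++ ·) := by
  induction fuel with
  | zero => intro l cur accs h; omega
  | succ n ih =>
    intro l cur accs h
    cases l with
    | nil => simp [go_nil, mySplit, List.modifyHead]
    | cons c rest =>
      rw [go_cons]
      by_cases hc : c = '$'
      · subst hc
        rw [if_pos rfl, ih rest [] (cur.reverse :: accs) (by simp at h ⊢; omega)]
        cases hms : mySplit rest with
        | nil => exact absurd hms (mySplit_ne_nil rest)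
        | cons a as => simp [mySplit, hms, List.modifyHead]
      · rw [if_neg hc, ih rest (c :: cur) accs (by simp at h ⊢; omega)]
        simp [mySplit, hc]
        rfl

theorem splitOn_eq (cs : List Char) : PySem.Chars.splitOn cs ['$'] = mySplit cs := by
  rw [show PySem.Chars.splitOn cs ['$']
        = PySem.Chars.splitOn.go ['$'] (cs.length + 1) cs [] [] from rfl]
  rw [splitOn_go_eq (cs.length + 1) cs [] [] (by omega)]
  cases h : mySplit cs with
  | nil => exact absurd h (mySplit_ne_nil cs)
  | cons a as => simp [List.modifyHead]

theorem modify_ext {α : Type} (l : List α) (k : Nat) (g f : α → α) (h : ∀ x, f x = g x) :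
    l.modify k f = l.modify k g := by
  induction l generalizing k with
  | nil => simp
  | cons a t ih => cases k <;> simp [List.modify_cons, h, ih]

theorem modify_id {α : Type} (l : List α) (k : Nat) : l.modify k (fun x => x) = l := by
  induction l generalizing k with
  | nil => simp
  | cons a t ih => cases k <;> simp [List.modify_cons, ih]

theorem modify_modify {α : Type} (l : List α) (k : Nat) (f g : α → α) :
    (l.modify k f).modify k g = l.modify k (fun x => g (f x)) := by
  induction l generalizing k with
  | nil => simp
  | cons a t ih => cases k <;> simp [List.modify_cons, ih]

-- common abstract loop: extend buckets k, k+1, … with the given segments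
def extendAll : List (List String) → Nat → List (List Char) → List (List String)
  | res, _, [] => res
  | res, k, seg :: rest =>
      extendAll (res.modify k (· ++ seg.map (fun c => String.ofList [c]))) (k + 1) rest

theorem extendAll_nilseg (res : List (List String)) (k : Nat) (rest : List (List Char)) :
    extendAll res k ([] :: rest) = extendAll res (k + 1) rest := by
  simp only [extendAll, List.map_nil]
  rw [modify_ext _ _ (fun x => x) _ (by simp), modify_id]

theorem foldA_eq (cs : List Char) :
    ∀ (res : List (List String)) (k : Nat),
      (cs.foldl fStep (res, k)).1 = extendAll res k (mySplit cs) := by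
  induction cs with
  | nil =>
    intro res k
    simp only [List.foldl_nil]
    rw [show mySplit [] = [[]] from rfl, extendAll_nilseg]
    rfl
  | cons c cs ih =>
    intro res k
    by_cases hc : c = '$'
    · subst hc
      simp only [List.foldl_cons]
      rw [show fStep (res, k) '$' = (res, k + 1) from rfl]
      rw [ih res (k + 1), show mySplit ('$' :: cs) = [] :: mySplit cs from rfl, extendAll_nilseg]
    · simp only [List.foldl_cons, fStep, if_pos hc]
      rw [ih _ k]
      cases hms : mySplit cs with
      | nil => exact absurd hms (mySplit_ne_nil cs)
      | cons seg rest =>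
        simp only [mySplit, if_neg hc, hms, List.modifyHead, extendAll, List.map_cons]
        rw [modify_modify]
        congr 1
        exact modify_ext _ _ _ _ (by intro x; simp)

theorem ofList_ne_empty {seg : List Char} (h : seg ≠ []) : String.ofList seg ≠ "" := by
  intro he
  apply h
  have : (String.ofList seg).toList = ("" : String).toList := by rw [he]
  simpa using this

theorem foldB_eq (segs : List (List Char)) :
    ∀ (res : List (List String)) (k : Nat),
      (PySem.List.enumerate (segs.map String.ofList) (k : Int)).foldl bStep res
        = extendAll res k segs := by
  induction segs with
  | nil => intro res k; simp [PySem.List.enumerate, extendAll]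
  | cons seg rest ih =>
    intro res k
    rw [List.map_cons, PySem.List.enumerate_cons, List.foldl_cons]
    by_cases hs : seg = []
    · subst hs
      have hb : bStep res ((k : Int), String.ofList []) = res := by simp [bStep]
      rw [hb, extendAll_nilseg, show ((k : Int) + 1) = ((k + 1 : Nat) : Int) by push_cast; ring,
          ih res (k + 1)]
    · have hne : String.ofList seg ≠ "" := ofList_ne_empty hs
      have hb : bStep res ((k : Int), String.ofList seg)
          = res.modify k (· ++ seg.map (fun c => String.ofList [c])) := by
        simp [bStep, hne]
      rw [hb, show ((k : Int) + 1) = ((k + 1 : Nat) : Int) by push_cast; ring, ih _ (k + 1)]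
      rfl

-- ===== VERDICT (by name: the statement is the Claim_ definition above) =====
theorem f_spec : Claim_equal_f := by
  intro s _ _
  unfold Spec_f f f_alt
  rw [foldA_eq]
  rw [show "$".toList = ['$'] from rfl, splitOn_eq]
  rw [show (0 : Int) = ((0 : Nat) : Int) from rfl, foldB_eq]
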